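-- pv_equiv track=rewrite | github.com/the-omega-institute/automath | theory/2026_golden_ratio_driven_scan_projection_generation_recursive_emergence/scripts/exp_fold_zm_elliptic_modular_y_qexp_audit.py | compute_a_list
-- ===== SOURCE A (Python) =====
-- from typing import Dict, List, Tuple
--
-- def _legendre_symbol(a: int, p: int) -> int:
--     a %= p
--     if a == 0:
--         return 0
--     x = pow(a, (p - 1) // 2, p)
--     return -1 if x == p - 1 else 1
--
-- def _a_p_good_or_2(p: int) -> int:
--     """Compute a_p = p+1-#E(F_p) for E0: eta^2+eta=x^3-x (p prime).
--
--     For p=2 we brute force; for odd primes we use the quadratic discriminant count.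
--     """
--     if p == 2:
--         pts = 1
--         for x in range(p):
--             for y in range(p):
--                 if (y * y + y - (x * x * x - x)) % p == 0:
--                     pts += 1
--         return p + 1 - pts
--
--     pts = 1  # point at infinity
--     for x in range(p):
--         rhs = (x * x * x - x) % p
--         disc = (1 + 4 * rhs) % p
--         pts += 1 + _legendre_symbol(disc, p)
--     return p + 1 - pts
--
-- def _primes_upto(n: int) -> List[int]:
--     ps: List[int] = []
--     for k in range(2, n + 1):
--         ok = True
--         for p in ps:
--             if p * p > k:
--                 break
--             if k % p == 0:
--                 ok = False
--                 break
--         if ok: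
--             ps.append(k)
--     return ps
--
-- def compute_a_list(N: int) -> List[int]:
--     """Return a_n for 0<=n<=N (a_0 unused, a_1=1) for E0: eta^2+eta=x^3-x."""
--     if N < 1:
--         raise ValueError("N must be >= 1")
--
--     ps = _primes_upto(N)
--     ap: Dict[int, int] = {}
--     for p in ps:
--         if p == 37:
--             # 37a1 has nonsplit multiplicative reduction at 37, hence a_37 = -1.
--             ap[p] = -1
--         else:
--             ap[p] = _a_p_good_or_2(p)
--
--     # Cache for prime powers.
--     apow: Dict[Tuple[int, int], int] = {(p, 0): 1 for p in ps}
--     for p in ps: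
--         apow[(p, 1)] = ap[p]
--
--     def a_prime_power(p: int, e: int) -> int:
--         if (p, e) in apow:
--             return apow[(p, e)]
--         if p == 37:
--             v = ap[p] ** e
--         else:
--             v = ap[p] * a_prime_power(p, e - 1) - p * a_prime_power(p, e - 2)
--         apow[(p, e)] = v
--         return v
--
--     a = [0] * (N + 1)
--     a[1] = 1
--     for n in range(2, N + 1):
--         m = n
--         res = 1
--         for p in ps:
--             if p * p > m:
--                 break
--             if m % p == 0:
--                 e = 0
--                 while m % p == 0:
--                     m //= p
--                     e += 1
--                 res *= a_prime_power(p, e)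
--         if m > 1:
--             res *= a_prime_power(m, 1)
--         a[n] = res
--     return a
-- ===== SOURCE B (Python) =====
-- from typing import Dict, List
--
-- def _legendre_symbol(a: int, p: int) -> int:
--     a %= p
--     if a == 0:
--         return 0
--     x = pow(a, (p - 1) // 2, p)
--     return -1 if x == p - 1 else 1
--
-- def _a_p_good_or_2(p: int) -> int:
--     """a_p = p+1-#E(F_p) for E0: eta^2+eta=x^3-x (p prime)."""
--     if p == 2:
--         pts = 1
--         for x in range(p):
--             for y in range(p):
--                 if (y * y + y - (x * x * x - x)) % p == 0:
--                     pts += 1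
--         return p + 1 - pts
--     pts = 1
--     for x in range(p):
--         rhs = (x * x * x - x) % p
--         disc = (1 + 4 * rhs) % p
--         pts += 1 + _legendre_symbol(disc, p)
--     return p + 1 - pts
--
-- def compute_a_list(N: int) -> List[int]:
--     """Return a_n for 0<=n<=N (a_0 unused, a_1=1) for E0: eta^2+eta=x^3-x."""
--     if N < 1:
--         raise ValueError("N must be >= 1")
--
--     ap_cache: Dict[int, int] = {}
--
--     def ap(p: int) -> int:
--         if p not in ap_cache:
--             ap_cache[p] = -1 if p == 37 else _a_p_good_or_2(p)
--         return ap_cache[p]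
--
--     def a_prime_power(p: int, e: int) -> int:
--         if e == 0:
--             return 1
--         if e == 1:
--             return ap(p)
--         if p == 37:
--             return ap(p) ** e
--         return ap(p) * a_prime_power(p, e - 1) - p * a_prime_power(p, e - 2)
--
--     # Multiplicative DP: a[n] = a_{p^e} * a[n / p^e] with p the smallest
--     # prime factor of n, reusing the already-computed smaller entry.
--     a = [0] * (N + 1)
--     a[1] = 1
--     for n in range(2, N + 1):
--         d = 2
--         while d * d <= n and n % d:
--             d += 1
--         p = d if d * d <= n else n  # smallest prime factor of n
--         m, e = n, 0
--         while m % p == 0: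
--             m //= p
--             e += 1
--         a[n] = a_prime_power(p, e) * a[m]
--     return a
-- ===== Notes on version B (the rewrite author's own statement) =====
-- stated objective: alternative
-- what changed: Keeps the point-counting helpers but replaces the prime-list + per-n trial-division-over-all-prime-divisors product assembly with a multiplicative DP: for each n find its smallest prime factor directly, strip that full prime power, and set a[n] = a_{p^e} * a[n/p^e] reusing the already-computed table entry; the precomputed prime list, the memo dicts and the per-n full product disappear.
import Mathlib
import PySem

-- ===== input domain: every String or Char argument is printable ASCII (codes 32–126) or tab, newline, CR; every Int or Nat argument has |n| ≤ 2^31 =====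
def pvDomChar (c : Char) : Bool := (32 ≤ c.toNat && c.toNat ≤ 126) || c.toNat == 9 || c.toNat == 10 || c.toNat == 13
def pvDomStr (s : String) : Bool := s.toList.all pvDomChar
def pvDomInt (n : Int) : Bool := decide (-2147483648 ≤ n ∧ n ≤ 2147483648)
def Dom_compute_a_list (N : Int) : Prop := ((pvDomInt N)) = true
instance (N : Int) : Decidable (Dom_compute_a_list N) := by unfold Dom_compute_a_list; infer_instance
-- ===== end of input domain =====

-- B replaces A's prime-list + per-n trial-division-over-primes product assembly by a
-- multiplicative DP on the smallest prime factor (alternative decomposition, not claimed faster).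

-- ===== PORT A =====
-- Helpers shared by both ports (identical code in Source A and Source B): legendre symbol,
-- point count, the prime-power recurrence (the Python memo dicts are pure caches of
-- these functions), and the `while m % p == 0: m //= p; e += 1` stripping loop.

-- pow(a, e, p) (modular exponentiation built-in); arguments are nonnegative
def pvPowMod (a e p : Nat) : Nat := a ^ e % p

-- _legendre_symbol, on the nonnegative ints A passes it (0 ≤ a, p odd prime)
def pvLegendre (a p : Nat) : Int :=
  let a := a % p
  if a = 0 then 0
  else if pvPowMod a ((p - 1) / 2) p = p - 1 then -1 else 1

-- _a_p_good_or_2; the p = 2 brute force takes % of a possibly negative value, ported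
-- exactly with PySem.Int.mod.  For odd p, x*x*x ≥ x so Nat subtraction is exact there.
def pvApGood (p : Nat) : Int :=
  if p = 2 then
    let pts := (List.range p).foldl (fun acc x =>
      (List.range p).foldl (fun acc y =>
        if PySem.Int.mod ((y : Int) * y + y - ((x : Int) * x * x - x)) (p : Int) = 0
        then acc + 1 else acc) acc) 1
    (p : Int) + 1 - pts
  else
    let pts := (List.range p).foldl (fun acc x =>
      let rhs := (x * x * x - x) % p
      let disc := (1 + 4 * rhs) % p
      acc + 1 + pvLegendre disc p) 1
    (p : Int) + 1 - pts

-- ap[p] exactly as the dict stores it (it is keyed by exactly the primes later looked up)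
def pvApFun (p : Nat) : Int := if p = 37 then -1 else pvApGood p

-- a_prime_power: the memo seeds (p,0) ↦ 1 and (p,1) ↦ ap[p] are the base cases
def pvApp (p : Nat) : Nat → Int
  | 0 => 1
  | 1 => pvApFun p
  | (e + 2) => if p = 37 then (pvApFun p) ^ (e + 2)
               else pvApFun p * pvApp p (e + 1) - (p : Int) * pvApp p e

-- `while m % p == 0: m //= p; e += 1`, returns (e, final m); the guard only makes it total
def pvStrip (p m : Nat) : Nat × Nat :=
  if h : 2 ≤ p ∧ p ∣ m ∧ m ≠ 0 then
    let r := pvStrip p (m / p)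
    (r.1 + 1, r.2)
  else (0, m)
termination_by m
decreasing_by exact Nat.div_lt_self (Nat.pos_of_ne_zero h.2.2) h.1

-- A only: inner loop of _primes_upto (`for p in ps: if p*p>k: break; if k%p==0: …`)
def pvTrialOK (k : Nat) : List Nat → Bool
  | [] => true
  | p :: rest => if p * p > k then true else if k % p = 0 then false else pvTrialOK k rest

-- A only: _primes_upto
def pvPrimesUpto (n : Nat) : List Nat :=
  (List.range' 2 (n + 1 - 2)).foldl (fun ps k => if pvTrialOK k ps then ps ++ [k] else ps) []

-- A only: the `for p in ps: break/strip` loop of compute_a_list, state (m, res)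
def pvTrialLoop : List Nat → Nat → Int → Nat × Int
  | [], m, res => (m, res)
  | p :: rest, m, res =>
    if p * p > m then (m, res)
    else if m % p = 0 then
      let s := pvStrip p m
      pvTrialLoop rest s.2 (res * pvApp p s.1)
    else pvTrialLoop rest m res

-- A only: one iteration of the main loop (the prime loop and the `if m > 1` fix-up)
def pvResA (ps : List Nat) (n : Nat) : Int :=
  let t := pvTrialLoop ps n 1
  if t.1 > 1 then t.2 * pvApp t.1 1 else t.2

-- compute_a_list; the Python raises ValueError for N < 1 (excluded by Pre_), port returns []
def compute_a_list (N : Int) : List Int :=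
  if N < 1 then []
  else
    let M := N.toNat
    let ps := pvPrimesUpto M
    0 :: 1 :: (List.range' 2 (M - 1)).map (fun n => pvResA ps n)

-- ===== PORT B =====
-- B only: `d = 2; while d*d <= n and n % d: d += 1`
def pvMinFacScan (n d : Nat) : Nat :=
  if d * d ≤ n ∧ n % d ≠ 0 then pvMinFacScan n (d + 1) else d
termination_by n + 1 - d
decreasing_by
  rename_i h
  rcases Nat.eq_zero_or_pos d with h0 | h0
  · omega
  · have hd : d ≤ n := le_trans (Nat.le_mul_of_pos_left d h0) h.1
    omega

-- B only: `p = d if d*d <= n else n` (the smallest prime factor of n for n ≥ 2)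
def pvSpfB (n : Nat) : Nat :=
  let d := pvMinFacScan n 2
  if d * d ≤ n then d else n

-- compute_a_list (B): multiplicative DP, a[n] = a_{p^e} * a[n / p^e] from the table
def compute_a_list_alt (N : Int) : List Int :=
  if N < 1 then []
  else
    let M := N.toNat
    (List.range' 2 (M - 1)).foldl
      (fun a n =>
        let p := pvSpfB n
        let s := pvStrip p n
        a ++ [pvApp p s.1 * a.getD s.2 0])
      [0, 1]

-- ===== PRECONDITION & SPEC =====
-- Pre_ excludes exactly N < 1, where the Python raises ValueError("N must be >= 1").
def Pre_compute_a_list (N : Int) : Prop := 1 ≤ N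
instance (N : Int) : Decidable (Pre_compute_a_list N) := by unfold Pre_compute_a_list; infer_instance
def pvWitness_compute_a_list : Int := (12)

def Spec_compute_a_list (N : Int) (out : List Int) : Prop := out = compute_a_list_alt N
instance (N : Int) (out : List Int) : Decidable (Spec_compute_a_list N out) := by unfold Spec_compute_a_list; infer_instance

-- ===== CLAIM (what is proved, stated in full; the proofs are below) =====
def Claim_equal_compute_a_list : Prop := ∀ (N : Int), Dom_compute_a_list N → Pre_compute_a_list N → Spec_compute_a_list N (compute_a_list N)

-- ===== LEMMAS AND PROOFS =====

-- basic properties of the stripping loop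
lemma pvStrip_spec (p : Nat) : ∀ m, 2 ≤ p → m ≠ 0 →
    (pvStrip p m).2 ≠ 0 ∧ ¬ p ∣ (pvStrip p m).2 ∧ p ^ (pvStrip p m).1 * (pvStrip p m).2 = m := by
  intro m
  induction m using Nat.strong_induction_on with
  | _ m ih =>
    intro hp hm
    by_cases h : 2 ≤ p ∧ p ∣ m ∧ m ≠ 0
    · rw [pvStrip, dif_pos h]
      have hdiv : m / p < m := Nat.div_lt_self (Nat.pos_of_ne_zero hm) hp
      have hm0 : m / p ≠ 0 := by
        rcases h.2.1 with ⟨c, rfl⟩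
        have : c ≠ 0 := by rintro rfl; simp at hm
        have : p * c / p = c := Nat.mul_div_cancel_left c (by omega)
        omega
      obtain ⟨h1, h2, h3⟩ := ih (m / p) hdiv hp hm0
      refine ⟨h1, h2, ?_⟩
      have : p * (m / p) = m := Nat.mul_div_cancel' h.2.1
      calc p ^ ((pvStrip p (m / p)).1 + 1) * (pvStrip p (m / p)).2
          = p * (p ^ (pvStrip p (m / p)).1 * (pvStrip p (m / p)).2) := by ring
        _ = p * (m / p) := by rw [h3]
        _ = m := this
    · rw [pvStrip, dif_neg h]
      have hnd : ¬ p ∣ m := by tauto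
      exact ⟨hm, hnd, by ring⟩

lemma pvStrip_snd_lt (p m : Nat) (hp : 2 ≤ p) (hd : p ∣ m) (hm : m ≠ 0) :
    (pvStrip p m).2 < m := by
  obtain ⟨h1, h2, h3⟩ := pvStrip_spec p m hp hm
  have he : 1 ≤ (pvStrip p m).1 := by
    by_contra h
    have : (pvStrip p m).1 = 0 := by omega
    rw [this] at h3; simp at h3; rw [h3] at h2; exact h2 hd
  calc (pvStrip p m).2 < p * (pvStrip p m).2 := by
        have := Nat.pos_of_ne_zero h1; nlinarith
    _ ≤ p ^ (pvStrip p m).1 * (pvStrip p m).2 := by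
        have : p ≤ p ^ (pvStrip p m).1 := by
          calc p = p ^ 1 := (pow_one p).symm
            _ ≤ p ^ (pvStrip p m).1 := Nat.pow_le_pow_right (by omega) he
        exact Nat.mul_le_mul_right _ this
    _ = m := h3

-- the common value: pvG n = a_n, by stripping the smallest prime factor
def pvG (n : Nat) : Int :=
  if _h : n ≤ 1 then 1
  else
    let p := n.minFac
    let s := pvStrip p n
    pvApp p s.1 * pvG s.2
termination_by n
decreasing_by
  exact pvStrip_snd_lt n.minFac n (Nat.minFac_prime (by omega)).two_le (Nat.minFac_dvd n) (by omega)

lemma pvG_one : pvG 1 = 1 := by rw [pvG]; norm_num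

lemma pvG_step (m : Nat) (hm : 2 ≤ m) :
    pvG m = pvApp m.minFac (pvStrip m.minFac m).1 * pvG (pvStrip m.minFac m).2 := by
  rw [pvG]; simp [show ¬ m ≤ 1 by omega]

lemma pvStrip_one (p : Nat) (hp : 2 ≤ p) : pvStrip p 1 = (0, 1) := by
  rw [pvStrip, dif_neg]
  rintro ⟨a, b, c⟩; exact absurd (Nat.le_of_dvd one_pos b) (by omega)

lemma pvStrip_self (p : Nat) (hp : p.Prime) : pvStrip p p = (1, 1) := by
  have h : 2 ≤ p ∧ p ∣ p ∧ p ≠ 0 := ⟨hp.two_le, dvd_rfl, by have := hp.two_le; omega⟩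
  rw [pvStrip, dif_pos h, Nat.div_self (by have := hp.two_le; omega), pvStrip_one p hp.two_le]

lemma pvG_prime (p : Nat) (hp : p.Prime) : pvG p = pvApp p 1 := by
  rw [pvG_step p hp.two_le, hp.minFac_eq, pvStrip_self p hp, pvG_one]
  simp

-- a number with no prime divisor q with q*q ≤ m is 1 or prime
lemma pv_one_or_prime (m : Nat) (h1 : 1 ≤ m)
    (h : ∀ q, q.Prime → q ∣ m → ¬ q * q ≤ m) : m = 1 ∨ m.Prime := by
  by_cases hm1 : m = 1
  · exact Or.inl hm1
  · right
    by_contra hnp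
    have h2 : 2 ≤ m := by omega
    have hq := Nat.minFac_prime hm1
    have hsq : m.minFac ^ 2 ≤ m := Nat.minFac_sq_le_self (by omega) hnp
    exact h m.minFac hq (Nat.minFac_dvd m) (by nlinarith [hsq])

lemma pv_finish_eq (m : Nat) (res : Int) (h1 : 1 ≤ m)
    (hnp : ∀ q, q.Prime → q ∣ m → ¬ q * q ≤ m) :
    (if m > 1 then res * pvApp m 1 else res) = res * pvG m := by
  rcases pv_one_or_prime m h1 hnp with h | h
  · subst h; simp [pvG_one]
  · rw [pvG_prime m h]; simp [show m > 1 by have := h.two_le; omega]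

-- main invariant of A's trial-division loop
lemma pvTrialLoop_eq : ∀ (ps : List Nat), ps.Pairwise (· < ·) → (∀ p ∈ ps, p.Prime) →
    ∀ (m : Nat) (res : Int), 1 ≤ m →
    (∀ q, q.Prime → q ∣ m → q * q ≤ m → q ∈ ps) →
    (if (pvTrialLoop ps m res).1 > 1 then
        (pvTrialLoop ps m res).2 * pvApp (pvTrialLoop ps m res).1 1
     else (pvTrialLoop ps m res).2) = res * pvG m := by
  intro ps
  induction ps with
  | nil =>
    intro _ _ m res h1 hcov
    simp only [pvTrialLoop]
    exact pv_finish_eq m res h1 (fun q hq hd hsq => by simpa using hcov q hq hd hsq)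
  | cons p rest ih =>
    intro hsort hprime m res h1 hcov
    have hps : p.Prime := hprime p (by simp)
    have hrest_lt : ∀ q ∈ rest, p < q := fun q hq => (List.pairwise_cons.mp hsort).1 q hq
    by_cases hbreak : p * p > m
    · simp only [pvTrialLoop, if_pos hbreak]
      refine pv_finish_eq m res h1 (fun q hq hd hsq => ?_)
      rcases List.mem_cons.mp (hcov q hq hd hsq) with rfl | h
      · omega
      · have := hrest_lt q h; nlinarith
    · simp only [pvTrialLoop, if_neg hbreak]
      by_cases hdvd : m % p = 0
      · simp only [if_pos hdvd]
        have hpd : p ∣ m := (Nat.dvd_iff_mod_eq_zero).mpr hdvd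
        have hm2 : 2 ≤ m := le_trans hps.two_le (Nat.le_of_dvd (by omega) hpd)
        -- p is the smallest prime factor of m
        have hmin : m.minFac = p := by
          have hle : m.minFac ≤ p := Nat.minFac_le_of_dvd hps.two_le hpd
          rcases Nat.lt_or_ge m.minFac p with hlt | hge
          · exfalso
            have hqp := Nat.minFac_prime (show m ≠ 1 by omega)
            have hqd := Nat.minFac_dvd m
            have hne : m.minFac ≠ p := by omega
            have hcop : Nat.Coprime m.minFac p := (Nat.coprime_primes hqp hps).mpr hne
            have hmul : m.minFac * p ∣ m := hcop.mul_dvd_of_dvd_of_dvd hqd hpd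
            have hmm : m.minFac * p ≤ m := Nat.le_of_dvd (by omega) hmul
            have hsq : m.minFac * m.minFac ≤ m := by nlinarith [hqp.two_le]
            rcases List.mem_cons.mp (hcov m.minFac hqp hqd hsq) with h | h
            · omega
            · have := hrest_lt _ h; omega
          · omega
        obtain ⟨hs1, hs2, hs3⟩ := pvStrip_spec p m hps.two_le (by omega)
        have ihres := ih (List.pairwise_cons.mp hsort).2
          (fun q hq => hprime q (List.mem_cons_of_mem p hq))
          (pvStrip p m).2 (res * pvApp p (pvStrip p m).1)
          (Nat.pos_of_ne_zero hs1)
          (fun q hq hd hsq => by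
            have hsub : (pvStrip p m).2 ∣ m := Dvd.intro_left _ hs3
            have hdm : q ∣ m := hd.trans hsub
            have hsqm : q * q ≤ m := le_trans hsq (Nat.le_of_dvd (by omega) hsub)
            rcases List.mem_cons.mp (hcov q hq hdm hsqm) with h | h
            · exfalso; subst h; exact hs2 hd
            · exact h)
        rw [ihres, pvG_step m hm2, hmin]; ring
      · simp only [if_neg hdvd]
        have hnd : ¬ p ∣ m := fun h => hdvd ((Nat.dvd_iff_mod_eq_zero).mp h)
        exact ih (List.pairwise_cons.mp hsort).2
          (fun q hq => hprime q (List.mem_cons_of_mem p hq)) m res h1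
          (fun q hq hd hsq => by
            rcases List.mem_cons.mp (hcov q hq hd hsq) with h | h
            · exact absurd (h ▸ hd) hnd
            · exact h)

-- _primes_upto produces exactly the primes, in order
lemma pvTrialOK_true (k : Nat) (hk : k.Prime) :
    ∀ ps : List Nat, (∀ p ∈ ps, p.Prime ∧ p < k) → pvTrialOK k ps = true := by
  intro ps
  induction ps with
  | nil => intro _; rfl
  | cons p rest ih =>
    intro h
    obtain ⟨hp, hpk⟩ := h p (List.mem_cons_self ..)
    simp only [pvTrialOK]
    by_cases hb : p * p > k
    · simp [hb]
    · simp only [if_neg hb]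
      have hnd : ¬ k % p = 0 := by
        intro hmod
        have : p ∣ k := (Nat.dvd_iff_mod_eq_zero).mpr hmod
        have := (Nat.prime_dvd_prime_iff_eq hp hk).mp this
        omega
      simp only [if_neg hnd]
      exact ih (fun q hq => h q (List.mem_cons_of_mem p hq))

lemma pvTrialOK_false (k : Nat) :
    ∀ ps : List Nat, ps.Pairwise (· < ·) →
    ∀ q, q ∈ ps → q ∣ k → q * q ≤ k → pvTrialOK k ps = false := by
  intro ps
  induction ps with
  | nil => intro _ q hq; simp at hq
  | cons p rest ih =>
    intro hsort q hq hd hsq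
    simp only [pvTrialOK]
    by_cases hb : p * p > k
    · exfalso
      rcases List.mem_cons.mp hq with rfl | hmem
      · omega
      · have := (List.pairwise_cons.mp hsort).1 q hmem; nlinarith
    · simp only [if_neg hb]
      by_cases hdvd : k % p = 0
      · simp [hdvd]
      · simp only [if_neg hdvd]
        rcases List.mem_cons.mp hq with rfl | hmem
        · exact absurd ((Nat.dvd_iff_mod_eq_zero).mp hd) hdvd
        · exact ih (List.pairwise_cons.mp hsort).2 q hmem hd hsq

lemma pvPrimesFold (len : Nat) :
    (List.range' 2 len).foldl (fun ps k => if pvTrialOK k ps then ps ++ [k] else ps) [] =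
    (List.range' 2 len).filter (fun k => decide k.Prime) := by
  induction len with
  | zero => rfl
  | succ len ih =>
    have hconcat : List.range' 2 (len + 1) = List.range' 2 len ++ [2 + len] := by
      simpa using (List.range'_concat (s := 2) (n := len) (step := 1))
    rw [hconcat, List.foldl_append, List.filter_append, ih]
    simp only [List.foldl_cons, List.foldl_nil, List.filter_cons, List.filter_nil]
    have hset : ∀ p, p ∈ (List.range' 2 len).filter (fun k => decide k.Prime) →
        p.Prime ∧ p < 2 + len := by
      intro p hp
      have hmem := List.mem_of_mem_filter hp
      have hrange := List.mem_range'_1.mp hmem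
      have hprime : p.Prime := by simpa using (List.of_mem_filter hp)
      exact ⟨hprime, by omega⟩
    have hsorted : ((List.range' 2 len).filter (fun k => decide k.Prime)).Pairwise (· < ·) :=
      (List.pairwise_lt_range' ..).filter _
    by_cases hk : (2 + len).Prime
    · rw [pvTrialOK_true (2 + len) hk _ hset]
      simp [hk]
    · have hk2 : (2:Nat) ≤ 2 + len := by omega
      have hq := Nat.minFac_prime (show 2 + len ≠ 1 by omega)
      have hqd := Nat.minFac_dvd (2 + len)
      have hsq : (2 + len).minFac * (2 + len).minFac ≤ 2 + len := by
        have := Nat.minFac_sq_le_self (show 0 < 2 + len by omega) hk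
        nlinarith [this]
      have hqmem : (2 + len).minFac ∈ (List.range' 2 len).filter (fun k => decide k.Prime) := by
        have hlt : (2 + len).minFac < 2 + len := by
          have hle := Nat.le_of_dvd (by omega) hqd
          have : (2 + len).minFac ≠ 2 + len := by
            intro he; exact hk (he ▸ hq)
          omega
        refine List.mem_filter.mpr ⟨List.mem_range'_1.mpr ⟨hq.two_le, by omega⟩, by simpa using hq⟩
      rw [pvTrialOK_false (2 + len) _ hsorted _ hqmem hqd hsq]
      simp [hk]

lemma pvPrimesUpto_spec (M : Nat) :
    pvPrimesUpto M = (List.range' 2 (M + 1 - 2)).filter (fun k => decide k.Prime) :=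
  pvPrimesFold (M + 1 - 2)

-- A's per-n result equals pvG n
lemma pvResA_eq_pvG (M n : Nat) (h2 : 2 ≤ n) (hn : n ≤ M) :
    pvResA (pvPrimesUpto M) n = pvG n := by
  unfold pvResA
  have := pvTrialLoop_eq (pvPrimesUpto M)
    (by rw [pvPrimesUpto_spec]; exact (List.pairwise_lt_range' ..).filter _)
    (by

      intro p hp
      rw [pvPrimesUpto_spec] at hp
      simpa using (List.of_mem_filter hp))
    n 1 (by omega)
    (by
      intro q hq hd hsq
      rw [pvPrimesUpto_spec]
      refine List.mem_filter.mpr ⟨List.mem_range'_1.mpr ⟨hq.two_le, ?_⟩, by simpa using hq⟩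
      have : q ≤ n := Nat.le_of_dvd (by omega) hd
      omega)
  simpa using this

-- B's scan finds the smallest divisor ≥ 2
lemma pvMinFacScan_spec (n : Nat) : ∀ d : Nat,
    (¬ ((pvMinFacScan n d) * (pvMinFacScan n d) ≤ n ∧ n % (pvMinFacScan n d) ≠ 0)) ∧
    (∀ c, d ≤ c → c < pvMinFacScan n d → c * c ≤ n ∧ n % c ≠ 0) := by
  intro d
  induction d using pvMinFacScan.induct n with
  | case1 d h ih =>
    rw [pvMinFacScan, if_pos h]
    refine ⟨ih.1, fun c hc hlt => ?_⟩
    rcases Nat.eq_or_lt_of_le hc with rfl | hlt2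
    · exact h
    · exact ih.2 c hlt2 hlt
  | case2 d h =>
    rw [pvMinFacScan, if_neg h]
    exact ⟨h, fun c hc hlt => by omega⟩

lemma pvSpfB_eq_minFac (n : Nat) (hn : 2 ≤ n) : pvSpfB n = n.minFac := by
  unfold pvSpfB
  obtain ⟨h1, h2⟩ := pvMinFacScan_spec n 2
  set r := pvMinFacScan n 2 with hr
  have hr2 : 2 ≤ r := by
    by_contra h
    have : r < 2 := by omega
    -- r < 2 is impossible: scan starts at 2 and only increases
    have : 2 ≤ r := by
      clear h1 h2
      rw [hr, pvMinFacScan]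
      split
      · -- recursive case: result of scan from 3 is ≥ 3? simpler: prove monotone bound
        have mono : ∀ d, d ≤ pvMinFacScan n d := by
          intro d
          induction d using pvMinFacScan.induct n with
          | case1 d h ih => rw [pvMinFacScan, if_pos h]; omega
          | case2 d h => rw [pvMinFacScan, if_neg h]
        exact le_trans (by omega) (mono 3)
      · omega
    omega
  by_cases hcase : r * r ≤ n
  · simp only [if_pos hcase]
    have hdvd : r ∣ n := by
      rcases Decidable.not_and_iff_not_or_not.mp h1 with h | h
      · exact absurd hcase h
      · exact (Nat.dvd_iff_mod_eq_zero).mpr (by simpa using h)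
    have hle : n.minFac ≤ r := Nat.minFac_le_of_dvd hr2 hdvd
    have hge : r ≤ n.minFac := by
      by_contra h
      have hlt : n.minFac < r := by omega
      have hm2 : 2 ≤ n.minFac := (Nat.minFac_prime (by omega)).two_le
      have := h2 n.minFac hm2 hlt
      exact this.2 ((Nat.dvd_iff_mod_eq_zero).mp (Nat.minFac_dvd n))
    omega
  · simp only [if_neg hcase]
    have hprime : n.Prime := by
      by_contra hnp
      have hq := Nat.minFac_prime (show n ≠ 1 by omega)
      have hsq : n.minFac * n.minFac ≤ n := by
        have := Nat.minFac_sq_le_self (show 0 < n by omega) hnp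
        nlinarith [this]
      have hlt : n.minFac < r := by nlinarith [hq.two_le]
      have := h2 n.minFac hq.two_le hlt
      exact this.2 ((Nat.dvd_iff_mod_eq_zero).mp (Nat.minFac_dvd n))
    exact (hprime.minFac_eq).symm

-- the DP table read: entries 1 ≤ m < 2 + k of the partial table are pvG m
lemma pvTable_getD (k m : Nat) (h1 : 1 ≤ m) (h2 : m < 2 + k) :
    (([0, 1] ++ (List.range' 2 k).map pvG) : List Int).getD m 0 = pvG m := by
  rcases Nat.eq_or_lt_of_le h1 with rfl | hm2
  · simp [pvG_one]
  · have hlen : ([0, 1] : List Int).length = 2 := rfl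
    have hm2' : 2 ≤ m := by omega
    rw [List.getD_eq_getElem?_getD, List.getElem?_append_right (by simp; omega)]
    have : m - ([0,1] : List Int).length = m - 2 := by simp
    rw [this]
    have hidx : m - 2 < k := by omega
    rw [List.getElem?_map, List.getElem?_range' (by omega)]
    simp [show 2 + (m - 2) = m by omega]

-- B's fold builds exactly the table of pvG values
lemma pvAltFold (k : Nat) :
    (List.range' 2 k).foldl
      (fun a n =>
        let p := pvSpfB n
        let s := pvStrip p n
        a ++ [pvApp p s.1 * a.getD s.2 0])
      ([0, 1] : List Int) = [0, 1] ++ (List.range' 2 k).map pvG := by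
  induction k with
  | zero => rfl
  | succ k ih =>
    have hconcat : List.range' 2 (k + 1) = List.range' 2 k ++ [2 + k] := by
      simpa using (List.range'_concat (s := 2) (n := k) (step := 1))
    rw [hconcat, List.foldl_append, ih, List.map_append]
    simp only [List.foldl_cons, List.foldl_nil, List.map_cons, List.map_nil]
    have hn2 : 2 ≤ 2 + k := by omega
    rw [pvSpfB_eq_minFac (2 + k) hn2]
    have hp := Nat.minFac_prime (show 2 + k ≠ 1 by omega)
    obtain ⟨hs1, hs2, hs3⟩ := pvStrip_spec (2 + k).minFac (2 + k) hp.two_le (by omega)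
    have hlt : (pvStrip (2 + k).minFac (2 + k)).2 < 2 + k :=
      pvStrip_snd_lt _ _ hp.two_le (Nat.minFac_dvd _) (by omega)
    rw [pvTable_getD k _ (Nat.pos_of_ne_zero hs1) hlt]
    rw [← pvG_step (2 + k) hn2]
    simp

-- ===== VERDICT (by name: the statement is the Claim_ definition above) =====
theorem compute_a_list_spec : Claim_equal_compute_a_list := by
  intro N _ hpre
  unfold Spec_compute_a_list compute_a_list compute_a_list_alt
  have hN : ¬ N < 1 := by exact not_lt.mpr hpre
  simp only [if_neg hN]
  rw [pvAltFold (N.toNat - 1)]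
  have hmap : (List.range' 2 (N.toNat - 1)).map (fun n => pvResA (pvPrimesUpto N.toNat) n) =
      (List.range' 2 (N.toNat - 1)).map pvG := by
    refine List.map_congr_left (fun n hn => ?_)
    have := List.mem_range'_1.mp hn
    exact pvResA_eq_pvG N.toNat n this.1 (by omega)
  rw [hmap]
  rfl
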